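-- pv_equiv track=rewrite | github.com/yushaona/Python-Job | tensorlayer/QueryImage.py | GetImageTableIndex
-- ===== SOURCE A (Python) =====
-- def GetImageTableIndex(studyuid):
--     multiplier1 = 31
--     divider = 200
--     value = 0
--     for item in studyuid:
--         value = (value*multiplier1 + ord(item))%4294967296
--     value = value%divider
--     return str(value)
-- ===== SOURCE B (Python) =====
-- def GetImageTableIndex(studyuid):
--     M = 4294967296
--     value = 0
--     power = 1
--     for c in reversed(studyuid):
--         value += ord(c) * power
--         power = power * 31 % M
--     return str(value % M % 200)
-- ===== Notes on version B (the rewrite author's own statement) =====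
-- stated objective: alternative
-- what changed: Replaces A's forward Horner loop (multiply-accumulate state reduced mod 2^32 each step) by a back-to-front traversal that sums ord(c) times a running power of 31 (kept reduced mod 2^32), reducing the sum mod 2^32 and mod 200 once at the end.
import Mathlib
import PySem

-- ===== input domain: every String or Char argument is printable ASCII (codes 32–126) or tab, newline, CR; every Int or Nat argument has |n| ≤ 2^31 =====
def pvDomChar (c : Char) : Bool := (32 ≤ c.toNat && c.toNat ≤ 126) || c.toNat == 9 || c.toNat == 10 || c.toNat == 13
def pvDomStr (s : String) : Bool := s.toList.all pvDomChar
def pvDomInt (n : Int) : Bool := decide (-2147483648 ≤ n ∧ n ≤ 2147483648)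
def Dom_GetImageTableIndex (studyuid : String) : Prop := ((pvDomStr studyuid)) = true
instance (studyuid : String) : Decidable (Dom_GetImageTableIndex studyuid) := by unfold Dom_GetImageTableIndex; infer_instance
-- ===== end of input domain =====

-- B replaces A's Horner loop (mod 2^32 each step) by an explicit power-weighted
-- polynomial sum reduced mod 2^32 and mod 200 once at the end (alternative decomposition).

-- ===== PORT A =====
def GetImageTableIndex (studyuid : String) : String :=
  let multiplier1 : Int := 31
  let divider : Int := 200
  let value : Int :=
    studyuid.toList.foldl
      (fun value item => PySem.Int.mod (value * multiplier1 + (item.toNat : Int)) 4294967296) 0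
  PySem.Int.toStr (PySem.Int.mod value divider)

-- ===== PORT B =====
def GetImageTableIndex_alt (studyuid : String) : String :=
  let M : Int := 4294967296
  -- for c in reversed(studyuid): value += ord(c) * power; power = power * 31 % M
  let r : Int × Int :=
    studyuid.toList.reverse.foldl
      (fun vp c => (vp.1 + (c.toNat : Int) * vp.2, PySem.Int.mod (vp.2 * 31) M)) (0, 1)
  PySem.Int.toStr (PySem.Int.mod (PySem.Int.mod r.1 M) 200)

-- ===== PRECONDITION & SPEC =====
def Spec_GetImageTableIndex (studyuid : String) (out : String) : Prop := out = GetImageTableIndex_alt studyuid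
instance (studyuid : String) (out : String) : Decidable (Spec_GetImageTableIndex studyuid out) := by unfold Spec_GetImageTableIndex; infer_instance

-- ===== CLAIM (what is proved, stated in full; the proofs are below) =====
def Claim_equal_GetImageTableIndex : Prop := ∀ (studyuid : String), Dom_GetImageTableIndex studyuid → Spec_GetImageTableIndex studyuid (GetImageTableIndex studyuid)

-- ===== LEMMAS AND PROOFS =====

-- pure (un-reduced) Horner evaluation of the polynomial
def pvHorner (l : List Char) (v : Int) : Int :=
  l.foldl (fun value item => value * 31 + (item.toNat : Int)) v

-- A's per-step-reduced fold equals the pure Horner value mod 2^32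
theorem pvFoldA_eq_horner_mod (l : List Char) (v : Int) :
    l.foldl (fun value item => PySem.Int.mod (value * 31 + (item.toNat : Int)) 4294967296)
        (v % 4294967296)
      = pvHorner l v % 4294967296 := by
  induction l generalizing v with
  | nil => simp [pvHorner]
  | cons c l ih =>
    simp only [List.foldl, pvHorner] at *
    rw [PySem.Int.mod_eq_emod_of_pos (by norm_num)]
    have h : (v % 4294967296 * 31 + (c.toNat : Int)) % 4294967296
        = (v * 31 + (c.toNat : Int)) % 4294967296 := by omega
    rw [h, ih]

-- the polynomial sum, head coefficient first
def pvPoly : List Char → Int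
  | [] => 0
  | c :: l => (c.toNat : Int) * 31 ^ l.length + pvPoly l

theorem pvHorner_eq_poly (l : List Char) (v : Int) :
    pvHorner l v = v * 31 ^ l.length + pvPoly l := by
  induction l generalizing v with
  | nil => simp [pvHorner, pvPoly]
  | cons c l ih =>
    show pvHorner l (v * 31 + (c.toNat : Int)) = _
    rw [ih]
    simp [pvPoly, pow_succ]
    ring

-- B's back-to-front accumulator: the running power is 31^k % 2^32 and the
-- running sum is congruent to the polynomial sum mod 2^32
theorem pvB_inv (l : List Char) :
    (l.foldr (fun c (vp : Int × Int) =>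
        (vp.1 + (c.toNat : Int) * vp.2, vp.2 * 31 % 4294967296)) (0, 1)).1 % 4294967296
      = pvPoly l % 4294967296
    ∧ (l.foldr (fun c (vp : Int × Int) =>
        (vp.1 + (c.toNat : Int) * vp.2, vp.2 * 31 % 4294967296)) (0, 1)).2
      = 31 ^ l.length % 4294967296 := by
  induction l with
  | nil => simp [pvPoly]
  | cons c l ih =>
    obtain ⟨h1, h2⟩ := ih
    constructor
    · show ((l.foldr _ (0, 1)).1 + (c.toNat : Int) * (l.foldr _ (0, 1)).2) % 4294967296 = _
      rw [h2]
      simp only [pvPoly]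
      conv_lhs => rw [Int.add_emod, Int.mul_emod, Int.emod_emod_of_dvd _ dvd_rfl, h1,
        ← Int.mul_emod, ← Int.add_emod]
      ring_nf
    · show (l.foldr _ (0, 1)).2 * 31 % 4294967296 = _
      rw [h2, List.length_cons, pow_succ]
      conv_lhs => rw [Int.mul_emod, Int.emod_emod_of_dvd _ dvd_rfl, ← Int.mul_emod]

-- ===== VERDICT (by name: the statement is the Claim_ definition above) =====
theorem GetImageTableIndex_spec : Claim_equal_GetImageTableIndex := by
  intro studyuid _
  unfold Spec_GetImageTableIndex GetImageTableIndex GetImageTableIndex_alt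
  simp only [PySem.Int.mod_eq_emod_of_pos (by norm_num : (0:Int) < 4294967296),
    PySem.Int.mod_eq_emod_of_pos (by norm_num : (0:Int) < 200), List.foldl_reverse]
  have hA := pvFoldA_eq_horner_mod studyuid.toList 0
  simp only [PySem.Int.mod_eq_emod_of_pos (by norm_num : (0:Int) < 4294967296)] at hA
  rw [show ((0:Int) % 4294967296) = 0 from by norm_num] at hA
  rw [hA, pvHorner_eq_poly]
  have hB := (pvB_inv studyuid.toList).1
  simp only at hB ⊢
  rw [hB]
  norm_num
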